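-- pv_equiv track=rewrite | github.com/jpauloo-git/simulador_cache | cache_simulator_GUI.py | simular_cache_LRU
-- ===== SOURCE A (Python) =====
-- from collections import deque          # Deque (fila dupla) para simulações de políticas de cache
-- from collections import deque
--
-- def simular_cache_LRU(padrao_acesso, cache_lines, associatividade, bloco_tamanho):
--     num_conjuntos = cache_lines // associatividade
--     cache = [deque() for _ in range(num_conjuntos)]
--     hits, misses = 0, 0
--     conjunto_log, hit_log = [], []
--
--     for endereco in padrao_acesso:
--         bloco = endereco // bloco_tamanho
--         conjunto = bloco % num_conjuntos
--         conjunto_atual = cache[conjunto]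
--
--         if bloco in conjunto_atual:
--             hits += 1
--             hit_log.append(1)
--             conjunto_atual.remove(bloco)      # Remove e reinsere no fim (mais recente)
--             conjunto_atual.append(bloco)
--         else:
--             misses += 1
--             hit_log.append(0)
--             if len(conjunto_atual) >= associatividade:
--                 conjunto_atual.popleft()      # Remove o menos recentemente usado
--             conjunto_atual.append(bloco)
--
--         conjunto_log.append(conjunto)
--
--     return conjunto_log, hit_log
-- ===== SOURCE B (Python) =====
-- def simular_cache_LRU(padrao_acesso, cache_lines, associatividade, bloco_tamanho):
--     num_conjuntos = cache_lines // associatividade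
--     conjunto_log = [(e // bloco_tamanho) % num_conjuntos for e in padrao_acesso]
--     tabelas = [dict() for _ in range(num_conjuntos)]
--     hit_log = []
--     for relogio, endereco in enumerate(padrao_acesso):
--         bloco = endereco // bloco_tamanho
--         tabela = tabelas[bloco % num_conjuntos]
--         hit = bloco in tabela
--         if not hit and len(tabela) >= associatividade:
--             vitima = min(tabela.items(), key=lambda kv: kv[1])[0]
--             del tabela[vitima]
--         tabela[bloco] = relogio
--         hit_log.append(1 if hit else 0)
--     return conjunto_log, hit_log
-- ===== Notes on version B (the rewrite author's own statement) =====
-- stated objective: alternative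
-- what changed: B drops A's per-set recency-ordered deques entirely: it computes conjunto_log in a separate first pass (a comprehension), then keeps per-set block-to-timestamp dictionaries with a global clock and evicts the minimum-timestamp entry found by a min-over-items scan, producing only hit_log in the second pass.
import Mathlib
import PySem

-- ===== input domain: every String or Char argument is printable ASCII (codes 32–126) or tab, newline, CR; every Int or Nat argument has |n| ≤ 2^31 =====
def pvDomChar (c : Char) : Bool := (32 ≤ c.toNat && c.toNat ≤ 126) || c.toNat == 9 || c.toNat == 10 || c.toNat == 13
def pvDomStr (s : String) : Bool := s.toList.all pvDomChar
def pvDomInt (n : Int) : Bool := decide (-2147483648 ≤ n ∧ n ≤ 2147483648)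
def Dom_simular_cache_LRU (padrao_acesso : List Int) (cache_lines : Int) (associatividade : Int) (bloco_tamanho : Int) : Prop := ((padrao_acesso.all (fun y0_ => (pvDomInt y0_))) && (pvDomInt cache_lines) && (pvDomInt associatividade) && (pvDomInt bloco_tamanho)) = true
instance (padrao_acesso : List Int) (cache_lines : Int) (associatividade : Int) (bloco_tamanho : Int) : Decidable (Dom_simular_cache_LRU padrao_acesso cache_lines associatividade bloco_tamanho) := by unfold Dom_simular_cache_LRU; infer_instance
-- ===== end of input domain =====

-- B replaces A's per-set recency deques by a separate map pass for conjunto_log plus per-set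
-- block→timestamp dictionaries with a global clock (victim = minimum-timestamp entry) for
-- hit_log; same return value (alternative decomposition/data structure, not claimed faster).

-- ===== PORT A =====
-- one iteration of A's for-loop; state = (cache, hits, misses, conjunto_log, hit_log)
def pvStepA (nc assoc bt : Int)
    (st : List (List Int) × Int × Int × List Int × List Int) (endereco : Int) :
    List (List Int) × Int × Int × List Int × List Int :=
  match st with
  | (cache, hits, misses, clog, hlog) =>
    let bloco := PySem.Int.floordiv endereco bt
    let conjunto := PySem.Int.mod bloco nc
    -- cache[conjunto]: in range on every input Pre_ admits; default [] for totality
    let atual := (PySem.List.pyGet? cache conjunto).getD []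
    if bloco ∈ atual then
      -- remove(bloco) then append(bloco); remove succeeds since bloco ∈ atual
      (cache.set conjunto.toNat (((PySem.List.remove? atual bloco).getD atual) ++ [bloco]),
       hits + 1, misses, clog ++ [conjunto], hlog ++ [1])
    else
      -- popleft() (deque nonempty here under Pre_) then append(bloco)
      (cache.set conjunto.toNat ((if assoc ≤ (atual.length : Int) then atual.tail else atual) ++ [bloco]),
       hits, misses + 1, clog ++ [conjunto], hlog ++ [0])

def simular_cache_LRU (padrao_acesso : List Int) (cache_lines : Int) (associatividade : Int) (bloco_tamanho : Int) : List Int × List Int :=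
  let num_conjuntos := PySem.Int.floordiv cache_lines associatividade
  let cache : List (List Int) := (PySem.List.pyRange 0 num_conjuntos 1).map (fun _ => [])
  let r := padrao_acesso.foldl (pvStepA num_conjuntos associatividade bloco_tamanho)
      (cache, 0, 0, [], [])
  (r.2.2.2.1, r.2.2.2.2)

-- ===== PORT B =====
-- the for-loop of B, as structural recursion on the access list producing hit_log directly;
-- 'relogio' is the enumerate counter, 'tabelas' the per-set block→timestamp dictionaries
def pvHits (assoc nc bt : Int) (relogio : Int)
    (tabelas : List (PySem.Dict Int Int)) : List Int → List Int
  | [] => []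
  | endereco :: resto =>
    let bloco := PySem.Int.floordiv endereco bt
    -- tabelas[bloco % nc]: in range on every input Pre_ admits; default empty dict for totality
    let tabela := (PySem.List.pyGet? tabelas (PySem.Int.mod bloco nc)).getD (PySem.Dict.mk [])
    let hit := tabela.contains bloco
    -- on a miss at capacity: victim = key of the minimum-timestamp item (dict nonempty under Pre_)
    let tabela1 :=
      if !hit && decide (assoc ≤ (tabela.size : Int)) then
        match PySem.List.min? tabela.items (fun kv => kv.2) with
        | some kv => tabela.erase kv.1
        | none => tabela
      else tabela
    (if hit then 1 else 0) ::
      pvHits assoc nc bt (relogio + 1)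
        (tabelas.set (PySem.Int.mod bloco nc).toNat (tabela1.insert bloco relogio)) resto

def simular_cache_LRU_alt (padrao_acesso : List Int) (cache_lines : Int) (associatividade : Int) (bloco_tamanho : Int) : List Int × List Int :=
  let num_conjuntos := PySem.Int.floordiv cache_lines associatividade
  let conjunto_log := padrao_acesso.map
      (fun e => PySem.Int.mod (PySem.Int.floordiv e bloco_tamanho) num_conjuntos)
  let tabelas : List (PySem.Dict Int Int) :=
      (PySem.List.pyRange 0 num_conjuntos 1).map (fun _ => PySem.Dict.mk [])
  (conjunto_log, pvHits associatividade num_conjuntos bloco_tamanho 0 tabelas padrao_acesso)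

-- ===== PRECONDITION & SPEC =====
-- Pre_ excludes exactly the inputs where Python A raises: associatividade = 0 (ZeroDivisionError),
-- and, when there is at least one access, bloco_tamanho = 0 (ZeroDivisionError),
-- num_conjuntos ≤ 0 (ZeroDivisionError/IndexError on cache[conjunto]) or associatividade < 0
-- (IndexError: popleft from an empty deque).
def Pre_simular_cache_LRU (padrao_acesso : List Int) (cache_lines : Int) (associatividade : Int) (bloco_tamanho : Int) : Prop :=
  associatividade ≠ 0 ∧ (padrao_acesso ≠ [] →
    1 ≤ associatividade ∧ bloco_tamanho ≠ 0 ∧ 1 ≤ PySem.Int.floordiv cache_lines associatividade)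
instance (padrao_acesso : List Int) (cache_lines : Int) (associatividade : Int) (bloco_tamanho : Int) : Decidable (Pre_simular_cache_LRU padrao_acesso cache_lines associatividade bloco_tamanho) := by unfold Pre_simular_cache_LRU; infer_instance

def pvWitness_simular_cache_LRU : List Int × Int × Int × Int := ([0, 1, 2, 9, 0, 5], 4, 2, 2)

def Spec_simular_cache_LRU (padrao_acesso : List Int) (cache_lines : Int) (associatividade : Int) (bloco_tamanho : Int) (out : List Int × List Int) : Prop := out = simular_cache_LRU_alt padrao_acesso cache_lines associatividade bloco_tamanho
instance (padrao_acesso : List Int) (cache_lines : Int) (associatividade : Int) (bloco_tamanho : Int) (out : List Int × List Int) : Decidable (Spec_simular_cache_LRU padrao_acesso cache_lines associatividade bloco_tamanho out) := by unfold Spec_simular_cache_LRU; infer_instance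

-- ===== CLAIM (what is proved, stated in full; the proofs are below) =====
def Claim_equal_simular_cache_LRU : Prop := ∀ (padrao_acesso : List Int) (cache_lines : Int) (associatividade : Int) (bloco_tamanho : Int), Dom_simular_cache_LRU padrao_acesso cache_lines associatividade bloco_tamanho → Pre_simular_cache_LRU padrao_acesso cache_lines associatividade bloco_tamanho → Spec_simular_cache_LRU padrao_acesso cache_lines associatividade bloco_tamanho (simular_cache_LRU padrao_acesso cache_lines associatividade bloco_tamanho)

-- ===== LEMMAS AND PROOFS =====

-- A deque d and a timestamp table m represent the same LRU set at global clock c: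
-- the entries of m are exactly the blocks of d paired with strictly increasing timestamps < c.
def RelLRU (c : Int) (d : List Int) (m : PySem.Dict Int Int) : Prop :=
  ∃ ts : List Int, ts.length = d.length ∧ ts.Pairwise (· < ·) ∧ (∀ t ∈ ts, t < c) ∧
    m.items.Perm (d.zip ts) ∧ d.Nodup

lemma pvGetD_lt {α : Type} (xs : List α) (i : Int) (dflt : α) (h0 : 0 ≤ i)
    (h : i.toNat < xs.length) : (PySem.List.pyGet? xs i).getD dflt = xs[i.toNat] := by
  rw [PySem.List.pyGet?_of_nonneg xs h0]
  simp [List.getElem?_eq_getElem h]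

lemma relLRU_mono {c c' : Int} {d : List Int} {m : PySem.Dict Int Int}
    (h : RelLRU c d m) (hc : c ≤ c') : RelLRU c' d m := by
  obtain ⟨ts, h1, h2, h3, h4, h5⟩ := h
  exact ⟨ts, h1, h2, fun t ht => lt_of_lt_of_le (h3 t ht) hc, h4, h5⟩

lemma relLRU_contains {c : Int} {d : List Int} {m : PySem.Dict Int Int}
    (h : RelLRU c d m) (b : Int) : m.contains b = true ↔ b ∈ d := by
  obtain ⟨ts, hlen, _, _, hperm, _⟩ := h
  simp only [PySem.Dict.contains, List.any_eq_true]
  constructor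
  · rintro ⟨p, hp, hpb⟩
    have hz : p ∈ d.zip ts := hperm.mem_iff.mp hp
    have h1 : p.1 ∈ (d.zip ts).map Prod.fst := List.mem_map_of_mem hz
    rw [List.map_fst_zip hlen.ge] at h1
    rwa [← (beq_iff_eq).mp hpb]
  · intro hbd
    have : b ∈ (d.zip ts).map Prod.fst := by rw [List.map_fst_zip hlen.ge]; exact hbd
    obtain ⟨p, hp, hfst⟩ := List.mem_map.mp this
    exact ⟨p, hperm.mem_iff.mpr hp, by simp [hfst]⟩

lemma relLRU_size {c : Int} {d : List Int} {m : PySem.Dict Int Int}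
    (h : RelLRU c d m) : m.size = d.length := by
  obtain ⟨ts, hlen, _, _, hperm, _⟩ := h
  simp [PySem.Dict.size, hperm.length_eq, List.length_zip, hlen]

lemma pvSplit (ts : List Int) (n m : Nat) (h : ts.length = n + m + 1) :
    ∃ tp t0 q, ts = tp ++ t0 :: q ∧ tp.length = n ∧ (q : List Int).length = m := by
  have hn : n < ts.length := by omega
  refine ⟨ts.take n, ts[n], ts.drop (n + 1), ?_, by simp; omega, by simp; omega⟩
  conv_lhs => rw [← List.take_append_drop n ts]
  rw [List.drop_eq_getElem_cons hn]

lemma relLRU_hit {c b : Int} {d : List Int} {m : PySem.Dict Int Int}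
    (h : RelLRU c d m) (hb : b ∈ d) :
    RelLRU (c + 1) (d.erase b ++ [b]) (m.insert b c) := by
  have hcont : m.contains b = true := (relLRU_contains h b).mpr hb
  obtain ⟨ts, hlen, hpw, hbd, hperm, hnd⟩ := h
  obtain ⟨u, v, rfl⟩ := List.append_of_mem hb
  rcases List.nodup_append.mp hnd with ⟨hu, hv', hdisj⟩
  have hbv : b ∉ v := (List.nodup_cons.mp hv').1
  have hbu : b ∉ u := fun hc => hdisj b hc b (by simp) rfl
  obtain ⟨tp, t0, q, rfl, hlp, hlq⟩ := pvSplit ts u.length v.length (by simp at hlen ⊢; omega)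
  have hzip : (u ++ b :: v).zip (tp ++ t0 :: q) = u.zip tp ++ (b, t0) :: v.zip q := by
    rw [List.zip_append hlp.symm]; rfl
  have hmapu : (u.zip tp).map (fun p => if (p.1 == b) = true then (b, c) else p) = u.zip tp := by
    have hcg : ∀ p ∈ u.zip tp, (if (p.1 == b) = true then (b, c) else p) = id p := by
      rintro ⟨a, t⟩ hpr
      have ha : a ∈ u := (List.of_mem_zip hpr).1
      simp [show a ≠ b from fun he => hbu (he ▸ ha)]
    rw [List.map_congr_left hcg, List.map_id]
  have hmapv : (v.zip q).map (fun p => if (p.1 == b) = true then (b, c) else p) = v.zip q := by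
    have hcg : ∀ p ∈ v.zip q, (if (p.1 == b) = true then (b, c) else p) = id p := by
      rintro ⟨a, t⟩ hpr
      have ha : a ∈ v := (List.of_mem_zip hpr).1
      simp [show a ≠ b from fun he => hbv (he ▸ ha)]
    rw [List.map_congr_left hcg, List.map_id]
  have herase : (u ++ b :: v).erase b = u ++ v := by
    rw [List.erase_append_right _ hbu, List.erase_cons_head]
  have hmemts : ∀ t, t ∈ tp ++ q → t ∈ tp ++ t0 :: q := by
    intro t ht
    rcases List.mem_append.mp ht with h' | h'
    · exact List.mem_append.mpr (Or.inl h')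
    · exact List.mem_append.mpr (Or.inr (List.mem_cons_of_mem _ h'))
  refine ⟨tp ++ q ++ [c], ?_, ?_, ?_, ?_, ?_⟩
  · rw [herase]
    simp only [List.length_append, List.length_cons, hlp, hlq]
    try omega
  · have hsub : (tp ++ q).Sublist (tp ++ t0 :: q) :=
      List.Sublist.append_left (List.sublist_cons_self t0 q) tp
    rw [List.pairwise_append]
    refine ⟨hpw.sublist hsub, List.pairwise_singleton _ _, ?_⟩
    intro a ha b' hb'
    simp at hb'
    subst hb'
    exact hbd a (hmemts a ha)
  · intro t ht
    rcases List.mem_append.mp ht with h' | h'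
    · have := hbd t (hmemts t h'); omega
    · simp at h'; omega
  · rw [PySem.Dict.items_insert_of_contains m c hcont]
    have s1 : ((m.items).map (fun p => if (p.1 == b) = true then (b, c) else p)).Perm
        (((u ++ b :: v).zip (tp ++ t0 :: q)).map (fun p => if (p.1 == b) = true then (b, c) else p)) :=
      hperm.map _
    have s2 : ((u ++ b :: v).zip (tp ++ t0 :: q)).map (fun p => if (p.1 == b) = true then (b, c) else p)
        = u.zip tp ++ (b, c) :: v.zip q := by
      rw [hzip]
      simp only [List.map_append, List.map_cons, hmapu, hmapv]
      simp
    have s3 : (u.zip tp ++ (b, c) :: v.zip q).Perm ((b, c) :: (u.zip tp ++ v.zip q)) :=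
      List.perm_middle
    have s4 : ((u ++ b :: v).erase b ++ [b]).zip (tp ++ q ++ [c])
        = u.zip tp ++ v.zip q ++ [(b, c)] := by
      rw [herase, List.append_assoc u v [b], List.append_assoc tp q [c],
          List.zip_append hlp.symm, List.zip_append hlq.symm, List.append_assoc]
      rfl
    rw [s4]
    exact ((s1.trans (s2 ▸ s3)).trans (List.perm_append_singleton _ _).symm)
  · rw [herase]
    have hsub : (u ++ v).Sublist (u ++ b :: v) :=
      List.Sublist.append_left (List.sublist_cons_self b v) u
    have h1 : (u ++ v).Nodup := hsub.nodup hnd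
    have h2 : b ∉ u ++ v := by simp [hbu, hbv]
    exact ((List.perm_append_singleton b (u ++ v)).nodup_iff).mpr (List.nodup_cons.mpr ⟨h2, h1⟩)

lemma relLRU_new {c b : Int} {d : List Int} {m : PySem.Dict Int Int}
    (h : RelLRU c d m) (hb : b ∉ d) :
    RelLRU (c + 1) (d ++ [b]) (m.insert b c) := by
  have hcont : m.contains b = false := by
    rw [← Bool.not_eq_true, relLRU_contains h b]; exact hb
  obtain ⟨ts, hlen, hpw, hbd, hperm, hnd⟩ := h
  refine ⟨ts ++ [c], by simp [hlen], ?_, ?_, ?_, ?_⟩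
  · rw [List.pairwise_append]
    exact ⟨hpw, List.pairwise_singleton _ _,
      by intro a ha b' hb'; simp at hb'; subst hb'; exact hbd a ha⟩
  · intro t ht
    rcases List.mem_append.mp ht with h' | h'
    · have := hbd t h'; omega
    · simp at h'; omega
  · rw [PySem.Dict.items_insert_of_not_contains m c hcont, List.zip_append hlen.symm]
    exact hperm.append_right [(b, c)]
  · exact ((List.perm_append_singleton b d).nodup_iff).mpr (List.nodup_cons.mpr ⟨hb, hnd⟩)

lemma relLRU_min {c x : Int} {rest : List Int} {m : PySem.Dict Int Int}
    (h : RelLRU c (x :: rest) m) :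
    ∃ t0, PySem.List.min? m.items (fun kv => kv.2) = some (x, t0) := by
  obtain ⟨ts, hlen, hpw, hbd, hperm, hnd⟩ := h
  cases ts with
  | nil => simp at hlen
  | cons t0 ts' =>
    have hzip : (x :: rest).zip (t0 :: ts') = (x, t0) :: rest.zip ts' := rfl
    have hne : m.items ≠ [] := by
      intro he
      have := hperm.length_eq
      rw [he, hzip] at this
      simp at this
    obtain ⟨kv, hkv⟩ : ∃ kv, PySem.List.min? m.items (fun kv => kv.2) = some kv := by
      cases hmin : PySem.List.min? m.items (fun kv => kv.2) with
      | none => exact absurd ((PySem.List.min?_eq_none_iff _ _).mp hmin) hne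
      | some kv => exact ⟨kv, rfl⟩
    have hmem : kv ∈ (x, t0) :: rest.zip ts' := by
      rw [← hzip]
      exact hperm.mem_iff.mp (PySem.List.min?_mem hkv)
    have hmin0 : kv.2 ≤ t0 :=
      PySem.List.min?_isMin hkv (x, t0) (hperm.mem_iff.mpr (by rw [hzip]; exact List.mem_cons_self))
    rcases List.mem_cons.mp hmem with heq | htail
    · exact ⟨t0, by rw [hkv, heq]⟩
    · exfalso
      obtain ⟨k, t⟩ := kv
      have ht : t ∈ ts' := (List.of_mem_zip htail).2
      have := (List.pairwise_cons.mp hpw).1 t ht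
      simp at hmin0
      omega

lemma relLRU_evict {c b x : Int} {rest : List Int} {m : PySem.Dict Int Int}
    (h : RelLRU c (x :: rest) m) (hb : b ∉ x :: rest) :
    RelLRU (c + 1) (rest ++ [b]) ((m.erase x).insert b c) := by
  obtain ⟨ts, hlen, hpw, hbd, hperm, hnd⟩ := h
  cases ts with
  | nil => simp at hlen
  | cons t0 ts' =>
    have hlen' : rest.length = ts'.length := by simp at hlen; omega
    have hxr : x ∉ rest := (List.nodup_cons.mp hnd).1
    have hzip : (x :: rest).zip (t0 :: ts') = (x, t0) :: rest.zip ts' := rfl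
    have hitems : (m.erase x).items = m.items.filter (fun p => !(p.1 == x)) := rfl
    have hperm1 : (m.erase x).items.Perm (rest.zip ts') := by
      rw [hitems]
      have s1 : (m.items.filter (fun p => !(p.1 == x))).Perm
          (((x, t0) :: rest.zip ts').filter (fun p => !(p.1 == x))) := by
        rw [← hzip]; exact hperm.filter _
      have s2 : ((x, t0) :: rest.zip ts').filter (fun p => !(p.1 == x))
          = rest.zip ts' := by
        have s3 : (rest.zip ts').filter (fun p => !(p.1 == x)) = rest.zip ts' := by
          apply List.filter_eq_self.mpr
          rintro ⟨a, t⟩ hpr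
          have ha : a ∈ rest := (List.of_mem_zip hpr).1
          simp [show a ≠ x from fun he => hxr (he ▸ ha)]
        simp [s3]
      exact s2 ▸ s1
    have hcont1 : (m.erase x).contains b = false := by
      rw [← Bool.not_eq_true]
      simp only [PySem.Dict.contains, List.any_eq_true]
      rintro ⟨⟨a, t⟩, hp, hpb⟩
      have ha : a ∈ rest := (List.of_mem_zip (hperm1.mem_iff.mp hp)).1
      exact hb (List.mem_cons_of_mem x ((beq_iff_eq.mp hpb) ▸ ha))
    have hbr : b ∉ rest := fun hc => hb (List.mem_cons_of_mem x hc)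
    refine ⟨ts' ++ [c], by simp [hlen'], ?_, ?_, ?_, ?_⟩
    · rw [List.pairwise_append]
      refine ⟨(List.pairwise_cons.mp hpw).2, List.pairwise_singleton _ _, ?_⟩
      intro a ha b' hb'
      simp at hb'
      subst hb'
      exact hbd a (List.mem_cons_of_mem t0 ha)
    · intro t ht
      rcases List.mem_append.mp ht with h' | h'
      · have := hbd t (List.mem_cons_of_mem t0 h'); omega
      · simp at h'; omega
    · rw [PySem.Dict.items_insert_of_not_contains _ c hcont1, List.zip_append hlen']
      exact hperm1.append_right [(b, c)]
    · exact ((List.perm_append_singleton b rest).nodup_iff).mpr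
        (List.nodup_cons.mpr ⟨hbr, (List.nodup_cons.mp hnd).2⟩)

lemma pvLoop_eq (nc assoc bt : Int) (hnc : 1 ≤ nc) (hassoc : 1 ≤ assoc) :
    ∀ (pa : List Int) (caches : List (List Int)) (tabs : List (PySem.Dict Int Int))
      (hits misses clock : Int) (clog hlog : List Int),
    caches.length = nc.toNat → tabs.length = nc.toNat →
    (∀ i (h1 : i < caches.length) (h2 : i < tabs.length), RelLRU clock caches[i] tabs[i]) →
    ((pa.foldl (pvStepA nc assoc bt) (caches, hits, misses, clog, hlog)).2.2.2.1
       = clog ++ pa.map (fun e => PySem.Int.mod (PySem.Int.floordiv e bt) nc) ∧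
     (pa.foldl (pvStepA nc assoc bt) (caches, hits, misses, clog, hlog)).2.2.2.2
       = hlog ++ pvHits assoc nc bt clock tabs pa) := by
  intro pa
  induction pa with
  | nil =>
    intro caches tabs hits misses clock clog hlog _ _ hrel
    simp [pvHits]
  | cons e pa' ih =>
    intro caches tabs hits misses clock clog hlog hca hta hrel
    have hj0 : 0 ≤ PySem.Int.mod (PySem.Int.floordiv e bt) nc :=
      PySem.Int.mod_nonneg _ (by omega)
    have hjlt : PySem.Int.mod (PySem.Int.floordiv e bt) nc < nc :=
      PySem.Int.mod_lt _ (by omega)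
    set bloco := PySem.Int.floordiv e bt with hbloco
    set j := PySem.Int.mod bloco nc with hjdef
    have hjc : j.toNat < caches.length := by rw [hca]; omega
    have hjt : j.toNat < tabs.length := by rw [hta]; omega
    have hrelj := hrel j.toNat hjc hjt
    have hA : (PySem.List.pyGet? caches j).getD [] = caches[j.toNat] := pvGetD_lt _ _ _ hj0 hjc
    have hB : (PySem.List.pyGet? tabs j).getD (PySem.Dict.mk []) = tabs[j.toNat] :=
      pvGetD_lt _ _ _ hj0 hjt
    simp only [List.foldl_cons, List.map_cons, pvStepA, pvHits, ← hbloco, ← hjdef, hA, hB]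
    by_cases hmem : bloco ∈ caches[j.toNat]
    · have hcont : tabs[j.toNat].contains bloco = true := (relLRU_contains hrelj bloco).mpr hmem
      rw [PySem.List.remove?_eq_some_erase _ _ hmem]
      simp only [hcont, if_pos hmem, Bool.not_true, Bool.false_and, Bool.false_eq_true,
        reduceIte, Option.getD_some]
      have key := ih (caches.set j.toNat (caches[j.toNat].erase bloco ++ [bloco]))
          (tabs.set j.toNat (tabs[j.toNat].insert bloco clock))
          (hits + 1) misses (clock + 1) (clog ++ [j]) (hlog ++ [1])
          (by simp [hca]) (by simp [hta]) ?_
      · rw [key.1, key.2]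
        simp [List.append_assoc]
      · intro i h1 h2
        simp only [List.length_set] at h1 h2
        simp only [List.getElem_set]
        by_cases hij : j.toNat = i
        · simp only [if_pos hij]
          subst hij
          exact relLRU_hit hrelj hmem
        · simp only [if_neg hij]
          exact relLRU_mono (hrel i h1 h2) (by omega)
    · have hcont : tabs[j.toNat].contains bloco = false := by
        rw [← Bool.not_eq_true, relLRU_contains hrelj bloco]; exact hmem
      have hsize : ((tabs[j.toNat]).size : Int) = (caches[j.toNat].length : Int) := by
        rw [relLRU_size hrelj]
      simp only [hcont, if_neg hmem, Bool.not_false, Bool.true_and, Bool.false_eq_true,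
        reduceIte, hsize]
      by_cases hev : assoc ≤ (caches[j.toNat].length : Int)
      · have hne : caches[j.toNat] ≠ [] := by
          intro h0
          rw [h0] at hev
          simp at hev
          omega
        obtain ⟨x, rest, hx⟩ := List.exists_cons_of_ne_nil hne
        have hrelx : RelLRU clock (x :: rest) tabs[j.toNat] := hx ▸ hrelj
        have hmemx : bloco ∉ x :: rest := hx ▸ hmem
        obtain ⟨t0, hmin⟩ := relLRU_min hrelx
        have hev' : assoc ≤ ((x :: rest).length : Int) := by rw [← hx]; exact hev
        simp only [hx, hmin, List.tail_cons, if_pos hev', decide_eq_true hev']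
        have key := ih (caches.set j.toNat (rest ++ [bloco]))
            (tabs.set j.toNat ((tabs[j.toNat].erase x).insert bloco clock))
            hits (misses + 1) (clock + 1) (clog ++ [j]) (hlog ++ [0])
            (by simp [hca]) (by simp [hta]) ?_
        · rw [key.1, key.2]
          simp [List.append_assoc]
        · intro i h1 h2
          simp only [List.length_set] at h1 h2
          simp only [List.getElem_set]
          by_cases hij : j.toNat = i
          · simp only [if_pos hij]
            subst hij
            exact relLRU_evict hrelx hmemx
          · simp only [if_neg hij]
            exact relLRU_mono (hrel i h1 h2) (by omega)
      · have hev2 : ¬ ((assoc ≤ ((caches[j.toNat].length : Nat) : Int)) = true) := by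
          simpa using hev
        simp only [if_neg hev, decide_eq_false hev]
        have key := ih (caches.set j.toNat (caches[j.toNat] ++ [bloco]))
            (tabs.set j.toNat (tabs[j.toNat].insert bloco clock))
            hits (misses + 1) (clock + 1) (clog ++ [j]) (hlog ++ [0])
            (by simp [hca]) (by simp [hta]) ?_
        · rw [key.1, key.2]
          simp [List.append_assoc]
        · intro i h1 h2
          simp only [List.length_set] at h1 h2
          simp only [List.getElem_set]
          by_cases hij : j.toNat = i
          · simp only [if_pos hij]
            subst hij
            exact relLRU_new hrelj hmem
          · simp only [if_neg hij]
            exact relLRU_mono (hrel i h1 h2) (by omega)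

-- ===== VERDICT (by name: the statement is the Claim_ definition above) =====
theorem simular_cache_LRU_spec : Claim_equal_simular_cache_LRU := by
  unfold Claim_equal_simular_cache_LRU
  intro pa cl assoc bt _ hpre
  unfold Spec_simular_cache_LRU
  cases pa with
  | nil => rfl
  | cons e pa' =>
    obtain ⟨ha0, hrest⟩ := hpre
    obtain ⟨h1, h2, h3⟩ := hrest (by simp)
    unfold simular_cache_LRU simular_cache_LRU_alt
    have hlenc : ((PySem.List.pyRange 0 (PySem.Int.floordiv cl assoc) 1).map
        (fun _ => ([] : List Int))).length = (PySem.Int.floordiv cl assoc).toNat := by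
      simp
    have hlent : ((PySem.List.pyRange 0 (PySem.Int.floordiv cl assoc) 1).map
        (fun _ => PySem.Dict.mk ([] : List (Int × Int)))).length
        = (PySem.Int.floordiv cl assoc).toNat := by
      simp
    have hrel0 : ∀ i (hh1 : i < ((PySem.List.pyRange 0 (PySem.Int.floordiv cl assoc) 1).map
          (fun _ => ([] : List Int))).length)
        (hh2 : i < ((PySem.List.pyRange 0 (PySem.Int.floordiv cl assoc) 1).map
          (fun _ => PySem.Dict.mk ([] : List (Int × Int)))).length),
        RelLRU 0 ((PySem.List.pyRange 0 (PySem.Int.floordiv cl assoc) 1).map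
          (fun _ => ([] : List Int)))[i]
          ((PySem.List.pyRange 0 (PySem.Int.floordiv cl assoc) 1).map
          (fun _ => PySem.Dict.mk ([] : List (Int × Int))))[i] := by
      intro i hh1 hh2
      simp only [List.getElem_map]
      exact ⟨[], rfl, List.Pairwise.nil, by simp, List.Perm.refl _, List.nodup_nil⟩
    have key := pvLoop_eq (PySem.Int.floordiv cl assoc) assoc bt h3 h1 (e :: pa') _ _ 0 0 0 [] []
      hlenc hlent hrel0
    simp only [List.nil_append] at key
    exact Prod.ext key.1 key.2
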